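-- pv_equiv track=rewrite | github.com/shader006/MedReCap | backend/docling.py | build_initial_page_ranges
-- ===== SOURCE A (Python) =====
-- def build_initial_page_ranges(page_count: int, batch_count: int) -> list[tuple[int, int]]:
--     batch_count = max(1, min(batch_count, page_count))
--     base_size, remainder = divmod(page_count, batch_count)
--     ranges: list[tuple[int, int]] = []
--     start = 0
--     for batch_index in range(batch_count):
--         current_size = base_size + (1 if batch_index < remainder else 0)
--         if current_size <= 0:
--             continue
--         end = start + current_size
--         ranges.append((start, end))
--         start = end
--     return ranges
-- ===== SOURCE B (Python) =====
-- def build_initial_page_ranges(page_count: int, batch_count: int) -> list[tuple[int, int]]: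
--     batch_count = max(1, min(batch_count, page_count))
--     base_size, remainder = divmod(page_count, batch_count)
--     # closed-form batch boundaries: batch i starts at i*base_size + min(i, remainder)
--     boundaries = [i * base_size + min(i, remainder) for i in range(batch_count + 1)]
--     return [(a, b) for a, b in zip(boundaries, boundaries[1:]) if a < b]
-- ===== Notes on version B (the rewrite author's own statement) =====
-- stated objective: simpler
-- what changed: Replaces the loop threading a running start accumulator (with a skip branch) by closed-form boundaries i*base_size+min(i,remainder) computed directly from the index and paired via zip with a strict filter.
import Mathlib
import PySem

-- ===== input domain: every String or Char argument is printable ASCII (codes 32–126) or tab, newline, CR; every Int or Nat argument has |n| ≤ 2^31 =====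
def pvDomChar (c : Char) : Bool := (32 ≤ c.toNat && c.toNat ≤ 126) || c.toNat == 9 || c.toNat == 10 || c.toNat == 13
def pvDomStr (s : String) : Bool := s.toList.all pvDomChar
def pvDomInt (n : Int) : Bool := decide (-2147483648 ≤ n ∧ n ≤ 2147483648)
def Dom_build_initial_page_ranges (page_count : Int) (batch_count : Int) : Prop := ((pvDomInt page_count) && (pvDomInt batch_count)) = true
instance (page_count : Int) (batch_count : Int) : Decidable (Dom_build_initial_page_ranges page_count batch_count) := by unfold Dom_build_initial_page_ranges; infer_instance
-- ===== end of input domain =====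

-- B replaces A's running-start accumulator loop by closed-form boundaries paired with zip (objective: simpler).

-- ===== PORT A =====
def build_initial_page_ranges (page_count : Int) (batch_count : Int) : List (Int × Int) :=
  let bc := max 1 (min batch_count page_count)
  let base_size := PySem.Int.floordiv page_count bc
  let remainder := PySem.Int.mod page_count bc
  ((PySem.List.pyRange 0 bc 1).foldl
    (fun (s : List (Int × Int) × Int) batch_index =>
      let current_size := base_size + (if batch_index < remainder then (1 : Int) else 0)
      if current_size ≤ 0 then s
      else (s.1 ++ [(s.2, s.2 + current_size)], s.2 + current_size))
    ([], 0)).1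

-- ===== PORT B =====
def build_initial_page_ranges_alt (page_count : Int) (batch_count : Int) : List (Int × Int) :=
  let bc := max 1 (min batch_count page_count)
  let base_size := PySem.Int.floordiv page_count bc
  let remainder := PySem.Int.mod page_count bc
  let boundaries := (PySem.List.pyRange 0 (bc + 1) 1).map (fun i => i * base_size + min i remainder)
  (boundaries.zip (PySem.List.slice boundaries (some 1) none)).filter (fun p => p.1 < p.2)

-- ===== PRECONDITION & SPEC =====
def Spec_build_initial_page_ranges (page_count : Int) (batch_count : Int) (out : List (Int × Int)) : Prop := out = build_initial_page_ranges_alt page_count batch_count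
instance (page_count : Int) (batch_count : Int) (out : List (Int × Int)) : Decidable (Spec_build_initial_page_ranges page_count batch_count out) := by unfold Spec_build_initial_page_ranges; infer_instance

-- ===== CLAIM (what is proved, stated in full; the proofs are below) =====
def Claim_equal_build_initial_page_ranges : Prop := ∀ (page_count : Int) (batch_count : Int), Dom_build_initial_page_ranges page_count batch_count → Spec_build_initial_page_ranges page_count batch_count (build_initial_page_ranges page_count batch_count)

-- ===== LEMMAS AND PROOFS =====

-- the closed-form boundary pairs both programs produce when every batch is nonempty
def pvPairs (base r : Int) (k : Nat) : List (Int × Int) :=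
  (List.range k).map (fun i : Nat =>
    ((i : Int) * base + min (i : Int) r, ((i : Int) + 1) * base + min ((i : Int) + 1) r))

-- A's loop over range k, with base ≥ 1, computes the closed-form boundary pairs.
theorem pvLoopA (base r : Int) (hb : 1 ≤ base) (hr : 0 ≤ r) (k : Nat) :
    (PySem.List.pyRange 0 (k : Int) 1).foldl
      (fun (s : List (Int × Int) × Int) batch_index =>
        let current_size := base + (if batch_index < r then (1 : Int) else 0)
        if current_size ≤ 0 then s
        else (s.1 ++ [(s.2, s.2 + current_size)], s.2 + current_size))
      ([], 0)
    = (pvPairs base r k, (k : Int) * base + min (k : Int) r) := by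
  induction k with
  | zero => simp [pvPairs, PySem.List.pyRange_one_eq_nil, hr]
  | succ n ih =>
    have hsplit : PySem.List.pyRange 0 ((n + 1 : Nat) : Int) 1
        = PySem.List.pyRange 0 (n : Int) 1 ++ [(n : Int)] := by
      push_cast
      exact PySem.List.pyRange_one_succ_right (by positivity)
    rw [hsplit, List.foldl_append, ih]
    simp only [List.foldl_cons, List.foldl_nil]
    have hcs : ¬ (base + (if (n : Int) < r then (1 : Int) else 0) ≤ 0) := by
      split_ifs <;> omega
    rw [if_neg hcs]
    have harith : (n : Int) * base + min (n : Int) r + (base + (if (n : Int) < r then (1 : Int) else 0))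
        = ((n : Int) + 1) * base + min ((n : Int) + 1) r := by
      rcases lt_or_ge (n : Int) r with h | h
      · rw [if_pos h, min_eq_left (by omega), min_eq_left (by omega)]; ring
      · rw [if_neg (not_lt.mpr h), min_eq_right (by omega), min_eq_right (by omega)]; ring
    rw [Prod.mk.injEq]
    refine ⟨?_, harith⟩
    rw [harith]
    simp [pvPairs, List.range_succ]

-- zipping a mapped range with its tail gives the adjacent pairs
theorem pvZipTail (h : Nat → Int) (k : Nat) :
    (((List.range (k + 1)).map h).zip (((List.range (k + 1)).map h).tail))
      = (List.range k).map (fun i => (h i, h (i + 1))) := by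
  apply List.ext_getElem
  · simp [List.length_zip]
  · intro i hi hi'
    simp only [List.length_zip, List.length_map, List.length_tail, List.length_range] at hi
    simp [List.getElem_zip, List.getElem_tail, List.getElem_map, List.getElem_range]

-- B's zip-and-filter over the closed-form boundaries gives the same pair list (all sizes positive)
theorem pvAltB (base r : Int) (hb : 1 ≤ base) (_hr : 0 ≤ r) (k : Nat) :
    ((((List.range (k + 1)).map (fun n : Nat => (n : Int))).map (fun i => i * base + min i r)).zip
        ((((List.range (k + 1)).map (fun n : Nat => (n : Int))).map (fun i => i * base + min i r)).tail)).filter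
        (fun p => decide (p.1 < p.2))
    = pvPairs base r k := by
  simp only [List.map_map]
  rw [pvZipTail ((fun i => i * base + min i r) ∘ (fun n : Nat => (n : Int))) k]
  rw [List.filter_eq_self.mpr]
  · unfold pvPairs
    apply List.map_congr_left
    intro i _
    simp only [Function.comp]
    push_cast
    rfl
  · intro p hp
    simp only [List.mem_map] at hp
    obtain ⟨i, _, rfl⟩ := hp
    simp only [Function.comp, decide_eq_true_eq]
    push_cast
    have hexp : ((i : Int) + 1) * base = (i : Int) * base + base := by ring
    rcases lt_or_ge ((i : Int) + 1) r with h2 | h2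
    · rw [min_eq_left (by omega), min_eq_left (by omega)]; omega
    · rcases lt_or_ge ((i : Int)) r with h | h
      · rw [min_eq_left (by omega), min_eq_right (by omega)]; omega
      · rw [min_eq_right (by omega), min_eq_right (by omega)]; omega

theorem build_initial_page_ranges_spec_aux (page_count batch_count : Int) :
    build_initial_page_ranges page_count batch_count
      = build_initial_page_ranges_alt page_count batch_count := by
  simp only [build_initial_page_ranges, build_initial_page_ranges_alt]
  by_cases hpc : page_count ≤ 0
  · -- page_count ≤ 0: clamp yields 1 batch of nonpositive size; both sides are []
    have hbc : max 1 (min batch_count page_count) = 1 := by omega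
    rw [hbc]
    have hfd : PySem.Int.floordiv page_count 1 = page_count := by
      rw [PySem.Int.floordiv_eq_ediv_of_pos (by omega)]; omega
    have hmd : PySem.Int.mod page_count 1 = 0 := by
      rw [PySem.Int.mod_eq_emod_of_pos (by omega)]; omega
    rw [hfd, hmd]
    have h1 : PySem.List.pyRange 0 1 1 = [(0 : Int)] := by decide
    have h2 : PySem.List.pyRange 0 (1 + 1) 1 = [(0 : Int), 1] := by decide
    rw [h1, h2]
    simp only [List.foldl_cons, List.foldl_nil, List.map_cons, List.map_nil]
    have hcs : (page_count + (if (0 : Int) < 0 then (1 : Int) else 0)) ≤ 0 := by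
      simp; omega
    rw [if_pos hcs]
    have hmin0 : min (0 : Int) 0 = 0 := by omega
    have hmin1 : min (1 : Int) 0 = 0 := by omega
    simp only [hmin0, hmin1, zero_mul, one_mul, add_zero,
      PySem.List.slice_from_one]
    simp [List.filter]
    rw [decide_eq_false (show ¬ (0 : Int) < page_count by omega)]
  · -- page_count > 0: every batch has positive size
    rw [not_le] at hpc
    set bc := max 1 (min batch_count page_count) with hbcdef
    have hbc1 : 1 ≤ bc := le_max_left _ _
    have hbcpc : bc ≤ page_count := by omega
    have hbcpos : (0 : Int) < bc := by omega
    have hfd : PySem.Int.floordiv page_count bc = page_count / bc :=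
      PySem.Int.floordiv_eq_ediv_of_pos hbcpos
    have hmd : PySem.Int.mod page_count bc = page_count % bc :=
      PySem.Int.mod_eq_emod_of_pos hbcpos
    rw [hfd, hmd]
    set base := page_count / bc with hbase
    set r := page_count % bc with hrdef
    have hb1 : 1 ≤ base := by
      rw [hbase, Int.le_ediv_iff_mul_le hbcpos]; omega
    have hr0 : 0 ≤ r := Int.emod_nonneg _ (by omega)
    have hrk : r < bc := Int.emod_lt_of_pos _ hbcpos
    obtain ⟨k, hk⟩ : ∃ k : Nat, bc = (k : Int) := ⟨bc.toNat, by omega⟩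
    rw [hk]
    rw [pvLoopA base r hb1 hr0 k]
    dsimp only
    have hcast : ((k : Int) + 1) = ((k + 1 : Nat) : Int) := by push_cast; ring
    rw [hcast, PySem.List.pyRange_zero_natCast, PySem.List.slice_from_one]
    exact (pvAltB base r hb1 hr0 k).symm

-- ===== VERDICT (by name: the statement is the Claim_ definition above) =====
theorem build_initial_page_ranges_spec : Claim_equal_build_initial_page_ranges := by
  intro p b _
  exact build_initial_page_ranges_spec_aux p b
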